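-- pv_equiv track=rewrite | github.com/TincyThomas/301-Days-of-Problem-Solving | Puzzle Pieces.py | puzzle_pieces
-- ===== SOURCE A (Python) =====
-- def puzzle_pieces(a1, a2):
--     a = []
--     if len(a1) == len(a2):
--         for i in range(0,len(a1)):
--             a = a + [a1[i]+a2[i]]
--         return True if len(set(a)) == 1 else False
--     else:
--         return False
-- ===== SOURCE B (Python) =====
-- def puzzle_pieces(a1, a2):
--     # All pairwise sums are equal iff a1's offsets from its first element
--     # mirror a2's offsets toward its first element; list equality also
--     # subsumes the length check.
--     return bool(a1) and bool(a2) and [x - a1[0] for x in a1] == [a2[0] - y for y in a2]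
-- ===== Notes on version B (the rewrite author's own statement) =====
-- stated objective: faster
-- what changed: Instead of building the list of pairwise sums by repeated O(n) list concatenation and deduplicating it with set(), B never computes a sum: it compares the offset list [x - a1[0]] against the mirrored offset list [a2[0] - y], whose equality (which also subsumes the length check) holds exactly when all pairwise sums are equal.
import Mathlib
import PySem

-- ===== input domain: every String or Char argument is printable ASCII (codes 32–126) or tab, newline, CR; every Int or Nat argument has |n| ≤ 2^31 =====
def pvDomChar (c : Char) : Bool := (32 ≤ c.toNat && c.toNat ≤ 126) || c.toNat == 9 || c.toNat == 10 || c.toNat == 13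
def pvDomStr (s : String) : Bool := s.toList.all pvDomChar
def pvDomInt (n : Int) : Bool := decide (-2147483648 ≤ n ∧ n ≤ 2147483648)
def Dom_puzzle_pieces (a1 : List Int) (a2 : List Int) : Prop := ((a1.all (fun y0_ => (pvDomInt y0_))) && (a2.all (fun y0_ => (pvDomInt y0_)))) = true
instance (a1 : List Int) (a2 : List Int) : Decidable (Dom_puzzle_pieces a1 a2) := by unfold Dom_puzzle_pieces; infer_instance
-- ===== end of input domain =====

-- B computes no sums at all: it compares a1's offset list [x - a1[0]] with a2's mirrored
-- offset list [a2[0] - y], replacing A's quadratic concatenation + set() dedup (faster).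

-- ===== PORT A =====
-- indices i from range(0, len(a1)) are always in range, so pyGetD's default 0 is never used
def puzzle_pieces (a1 : List Int) (a2 : List Int) : Bool :=
  if a1.length == a2.length then
    let a := (PySem.List.pyRange 0 (a1.length : Int) 1).foldl
      (fun acc i => acc ++ [PySem.List.pyGetD a1 i 0 + PySem.List.pyGetD a2 i 0]) []
    if (PySem.Set.ofList a).length == 1 then true else false
  else
    false

-- ===== PORT B =====
-- a1[0]/a2[0] are only read when the lists are nonempty (short-circuit), so pyGetD's default is never used
def puzzle_pieces_alt (a1 : List Int) (a2 : List Int) : Bool :=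
  !a1.isEmpty && (!a2.isEmpty &&
    (a1.map (fun x => x - PySem.List.pyGetD a1 0 0) ==
     a2.map (fun y => PySem.List.pyGetD a2 0 0 - y)))

-- ===== PRECONDITION & SPEC =====
def Spec_puzzle_pieces (a1 : List Int) (a2 : List Int) (out : Bool) : Prop := out = puzzle_pieces_alt a1 a2
instance (a1 : List Int) (a2 : List Int) (out : Bool) : Decidable (Spec_puzzle_pieces a1 a2 out) := by unfold Spec_puzzle_pieces; infer_instance

-- ===== CLAIM (what is proved, stated in full; the proofs are below) =====
def Claim_equal_puzzle_pieces : Prop := ∀ (a1 : List Int) (a2 : List Int), Dom_puzzle_pieces a1 a2 → Spec_puzzle_pieces a1 a2 (puzzle_pieces a1 a2)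

-- ===== LEMMAS AND PROOFS =====

-- A's loop builds exactly the list of pairwise sums of zip a1 a2
theorem sums_loop_eq (a1 a2 : List Int) (h : a1.length = a2.length) :
    (PySem.List.pyRange 0 (a1.length : Int) 1).foldl
      (fun acc i => acc ++ [PySem.List.pyGetD a1 i 0 + PySem.List.pyGetD a2 i 0]) []
      = (a1.zip a2).map (fun p => p.1 + p.2) := by
  rw [PySem.List.foldl_append_singleton_eq_map, PySem.List.pyRange_one]
  simp only [sub_zero, Int.toNat_natCast, List.map_map]
  apply List.ext_getElem
  · simp [List.length_zip, h]
  · intro k hk _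
    have hk1 : k < a1.length := by simpa using hk
    have hk2 : k < a2.length := by omega
    simp [PySem.List.pyGetD_natCast, hk1, hk2]

-- set(L) has one element for a nonempty L exactly when every element equals the head
theorem ofList_len_one_iff (s : Int) (l : List Int) :
    (PySem.Set.ofList (s :: l)).length = 1 ↔ ∀ z ∈ l, z = s := by
  constructor
  · intro h z hz
    obtain ⟨w, hw⟩ := List.length_eq_one_iff.mp h
    have hx : s ∈ PySem.Set.ofList (s :: l) := by
      rw [PySem.Set.mem_ofList]; exact List.mem_cons_self
    have hz' : z ∈ PySem.Set.ofList (s :: l) := by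
      rw [PySem.Set.mem_ofList]; exact List.mem_cons_of_mem _ hz
    rw [hw] at hx hz'
    simp at hx hz'; omega
  · intro h
    have : PySem.Set.ofList (s :: l) = [s] := by
      rw [PySem.Set.ofList_eq_foldl]
      show List.foldl PySem.Set.add [] (s :: l) = [s]
      simp only [List.foldl_cons]
      have h0 : PySem.Set.add ([] : List Int) s = [s] := by
        simp [PySem.Set.add, PySem.Set.contains]
      rw [h0]
      induction l with
      | nil => rfl
      | cons y ys ih =>
        have hy : y = s := h y List.mem_cons_self
        have hstep : PySem.Set.add [s] y = [s] := by
          simp [PySem.Set.add, PySem.Set.contains, hy]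
        simp only [List.foldl_cons, hstep]
        exact ih (fun z hz => h z (List.mem_cons_of_mem _ hz))
    rw [this]; rfl

-- A's singleton-set test on s :: l is the all-equal-to-s test on l
theorem set_test_eq_all (s : Int) (l : List Int) :
    (if (PySem.Set.ofList (s :: l)).length == 1 then true else false)
      = l.all (fun z => z == s) := by
  by_cases hall : ∀ z ∈ l, z = s
  · rw [if_pos (by simpa using (ofList_len_one_iff s l).mpr hall)]
    symm; rw [List.all_eq_true]; intro z hz; simpa using hall z hz
  · rw [if_neg (by simpa using fun h => hall ((ofList_len_one_iff s l).mp h))]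
    symm
    by_contra hc
    rw [Bool.not_eq_false, List.all_eq_true] at hc
    exact hall fun z hz => by simpa using hc z hz

-- for equal-length tails, "every pairwise sum equals x + y" is exactly B's offset-list equality
theorem all_sum_eq_offsets (x y : Int) : ∀ (xs ys : List Int), xs.length = ys.length →
    ((xs.zip ys).map (fun p => p.1 + p.2)).all (fun z => z == x + y)
      = (xs.map (fun z => z - x) == ys.map (fun z => y - z)) := by
  intro xs
  induction xs with
  | nil => intro ys h; cases ys with
    | nil => rfl
    | cons b bs => simp at h
  | cons a as ih =>
    intro ys h
    cases ys with
    | nil => simp at h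
    | cons b bs =>
      have ht : as.length = bs.length := by simpa using h
      have hhead : ((a + b : Int) == x + y) = ((a - x : Int) == y - b) := by
        by_cases hc : a + b = x + y
        · have : a - x = y - b := by omega
          simp [hc, this]
        · have : a - x ≠ y - b := by omega
          simp [hc, this]
      simp only [List.zip_cons_cons, List.map_cons, List.all_cons, List.cons_beq_cons,
        ih bs ht, hhead]

-- ===== VERDICT (by name: the statement is the Claim_ definition above) =====
theorem puzzle_pieces_spec : Claim_equal_puzzle_pieces := by
  intro a1 a2 _
  unfold Spec_puzzle_pieces puzzle_pieces puzzle_pieces_alt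
  cases a1 with
  | nil =>
    cases a2 with
    | nil => decide
    | cons y ys => simp
  | cons x xs =>
    cases a2 with
    | nil => simp
    | cons y ys =>
      by_cases hlen : xs.length = ys.length
      · have hb : ((x :: xs).length == (y :: ys).length) = true := by simp [hlen]
        rw [if_pos hb]
        rw [sums_loop_eq _ _ (by simpa using hlen)]
        have hg1 : PySem.List.pyGetD (x :: xs) 0 0 = x := by
          simp [PySem.List.pyGetD, PySem.List.pyGet?, PySem.List.pyIdx?]
        have hg2 : PySem.List.pyGetD (y :: ys) 0 0 = y := by
          simp [PySem.List.pyGetD, PySem.List.pyGet?, PySem.List.pyIdx?]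
        simp only [List.zip_cons_cons, List.map_cons, hg1, hg2, List.isEmpty_cons,
          Bool.not_false, Bool.true_and, List.cons_beq_cons]
        refine (set_test_eq_all (x + y) (List.map (fun p => p.1 + p.2) (xs.zip ys))).trans ?_
        rw [all_sum_eq_offsets x y xs ys hlen]
        simp
      · have hb : ((x :: xs).length == (y :: ys).length) = false := by simp [hlen]
        rw [if_neg (by simp; omega)]
        have hmaps : ((x :: xs).map (fun z => z - PySem.List.pyGetD (x :: xs) 0 0) ==
            (y :: ys).map (fun z => PySem.List.pyGetD (y :: ys) 0 0 - z)) = false := by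
          apply beq_eq_false_iff_ne.mpr
          intro hc
          have := congrArg List.length hc
          simp at this
          omega
        simp only [List.isEmpty_cons, Bool.not_false, Bool.true_and, hmaps]
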